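-- pv_equiv track=rewrite | github.com/DiegoMunoz3060/Elementary-Linear-Algebra-Matrix-Inverse-Calculator- | main.py | adjoin_identity
-- ===== SOURCE A (Python) =====
-- def adjoin_identity(matrix):
--     N = len(matrix)  # Size of the matrix
--     identity_matrix = []  # Create identity matrix
--     for i in range(N):
--         row = []
--         for j in range(N):
--             if i == j:
--                 row.append(1)
--             else:
--                 row.append(0)
--         identity_matrix.append(row)
--
--     adjoined_matrix = []  # Initialize the adjoined matrix
--
--     for i in range(N):
--         adjoined_matrix.append(matrix[i] + identity_matrix[i])  # Combine rows of input matrix and identity matrix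
--
--     return adjoined_matrix
-- ===== SOURCE B (Python) =====
-- def adjoin_identity(matrix):
--     adjoined = []
--     e = [1] + [0] * (len(matrix) - 1) if matrix else []
--     for row in matrix:
--         adjoined.append(row + e)
--         e = e[-1:] + e[:-1]   # rotate the unit row one place to the right
--     return adjoined
-- ===== Notes on version B (the rewrite author's own statement) =====
-- stated objective: alternative
-- what changed: Replaced A's two indexed passes (materialize the full identity matrix with an inner i==j comparison loop, then index both matrices to combine rows) by a single pass over the rows that carries the current unit row as state and rotates it one place right (e[-1:] + e[:-1]) after each row, with no indexing and no precomputed identity matrix.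
import Mathlib
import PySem

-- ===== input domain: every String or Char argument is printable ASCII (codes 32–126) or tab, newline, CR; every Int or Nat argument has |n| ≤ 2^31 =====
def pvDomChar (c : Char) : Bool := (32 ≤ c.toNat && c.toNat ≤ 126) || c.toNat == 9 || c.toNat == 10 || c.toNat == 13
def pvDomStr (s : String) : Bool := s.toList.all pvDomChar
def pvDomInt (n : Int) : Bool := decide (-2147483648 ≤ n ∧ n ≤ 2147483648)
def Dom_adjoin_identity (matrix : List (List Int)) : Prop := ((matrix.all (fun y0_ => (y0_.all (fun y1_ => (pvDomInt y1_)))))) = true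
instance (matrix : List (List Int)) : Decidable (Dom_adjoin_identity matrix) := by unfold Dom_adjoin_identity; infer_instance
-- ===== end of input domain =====

-- B replaces A's two indexed passes by one pass over the rows that maintains the current
-- identity row as rotating state (simpler decomposition, same O(n^2) cost; no indexing).


-- ===== PORT A =====
-- Port of A: build the identity matrix row by row (inner comparison loop), then a second
-- pass appending matrix[i] ++ identity[i].  matrix[i] and identity[i] are always in
-- range (i < N), so indexing is ported with getD (exact for in-range indices).
def adjoin_identity (matrix : List (List Int)) : List (List Int) :=
  let N := matrix.length
  let identity_matrix := (List.range N).foldl (fun acc i =>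
    acc ++ [(List.range N).foldl (fun row j =>
      row ++ [if i = j then (1 : Int) else 0]) []]) []
  (List.range N).foldl (fun acc i =>
    acc ++ [matrix.getD i [] ++ identity_matrix.getD i []]) []

-- ===== PORT B =====
-- Port of B: one fold over the rows carrying (adjoined, e); the unit row e is rotated
-- one place to the right after each row (e[-1:] + e[:-1], ported with PySem slices).
def adjoin_identity_alt (matrix : List (List Int)) : List (List Int) :=
  let e0 : List Int :=
    if matrix ≠ [] then 1 :: List.replicate (matrix.length - 1) 0 else []
  (matrix.foldl (fun (st : List (List Int) × List Int) row =>
      (st.1 ++ [row ++ st.2],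
       PySem.List.slice st.2 (some (-1)) none ++ PySem.List.slice st.2 none (some (-1))))
    ([], e0)).1

-- ===== PRECONDITION & SPEC =====
def Spec_adjoin_identity (matrix : List (List Int)) (out : List (List Int)) : Prop := out = adjoin_identity_alt matrix
instance (matrix : List (List Int)) (out : List (List Int)) : Decidable (Spec_adjoin_identity matrix out) := by unfold Spec_adjoin_identity; infer_instance

-- ===== CLAIM (what is proved, stated in full; the proofs are below) =====
def Claim_equal_adjoin_identity : Prop := ∀ (matrix : List (List Int)), Dom_adjoin_identity matrix → Spec_adjoin_identity matrix (adjoin_identity matrix)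

-- ===== LEMMAS AND PROOFS =====

-- the i-th unit row of size N
def pvRowI (N i : Nat) : List Int :=
  List.replicate i 0 ++ [1] ++ List.replicate (N - i - 1) 0

-- foldl-append over a list is a map
theorem pv_foldl_eq_map {α β : Type} (f : α → β) :
    ∀ (l : List α) (acc : List β),
      l.foldl (fun acc i => acc ++ [f i]) acc = acc ++ l.map f := by
  intro l
  induction l with
  | nil => intro acc; simp
  | cons x xs ih => intro acc; simp [List.foldl, ih]

-- element i of a mapped range
theorem pv_getD_map_range {β : Type} (g : Nat → β) (N i : Nat) (h : i < N) (d : β) :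
    ((List.range N).map g).getD i d = g i := by
  rw [List.getD_eq_getElem _ _ (by simpa using h)]
  simp

-- A's inner comparison loop produces the unit row
theorem pv_indicator_row (N i : Nat) (h : i < N) :
    (List.range N).map (fun j => if i = j then (1 : Int) else 0) = pvRowI N i := by
  obtain ⟨k, rfl⟩ : ∃ k, N = i + 1 + k := ⟨N - i - 1, by omega⟩
  rw [List.range_add, List.range_succ, List.map_append, List.map_append, List.map_map]
  have h1 : (List.range i).map (fun j => if i = j then (1 : Int) else 0)
      = List.replicate i 0 := by
    rw [List.eq_replicate_iff]
    refine ⟨by simp, ?_⟩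
    intro b hb
    obtain ⟨x, hx, rfl⟩ := List.mem_map.mp hb
    have := List.mem_range.mp hx
    simp; omega
  have h2 : (List.range k).map ((fun j => if i = j then (1 : Int) else 0) ∘ (fun j => i + 1 + j))
      = List.replicate (i + 1 + k - i - 1) 0 := by
    rw [List.eq_replicate_iff]
    refine ⟨by simp; omega, ?_⟩
    intro b hb
    obtain ⟨x, hx, rfl⟩ := List.mem_map.mp hb
    simp [Function.comp]; omega
  simp [pvRowI, h1, h2]

-- A equals the closed form: row i is matrix[i] ++ unit row i
theorem pv_A_closed (matrix : List (List Int)) :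
    adjoin_identity matrix
      = (List.range matrix.length).map (fun i => matrix.getD i [] ++ pvRowI matrix.length i) := by
  unfold adjoin_identity
  simp only [pv_foldl_eq_map, List.nil_append]
  apply List.map_congr_left
  intro i hi
  have hiN : i < matrix.length := List.mem_range.mp hi
  rw [pv_getD_map_range _ _ _ hiN, pv_indicator_row _ _ hiN]

-- rotating the unit row one step right
theorem pv_rotate_row (N i : Nat) (h : i + 1 < N) :
    PySem.List.slice (pvRowI N i) (some (-1)) none
      ++ PySem.List.slice (pvRowI N i) none (some (-1)) = pvRowI N (i + 1) := by
  rw [PySem.List.slice_from_neg_one, PySem.List.slice_to_neg_one]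
  have hlen : (pvRowI N i).length = N := by simp [pvRowI]; omega
  obtain ⟨k, hk⟩ : ∃ k, N - i - 1 = k + 1 := ⟨N - i - 2, by omega⟩
  have hrow : pvRowI N i = List.replicate i 0 ++ [1] ++ (List.replicate k 0 ++ [(0:Int)]) := by
    simp [pvRowI, hk, List.replicate_succ' (n := k)]
  rw [hlen, hrow]
  have hdrop : N - 1 = (List.replicate i (0:Int) ++ [1] ++ List.replicate k 0).length := by
    simp; omega
  rw [show List.replicate i (0:Int) ++ [1] ++ (List.replicate k 0 ++ [(0:Int)])
        = (List.replicate i (0:Int) ++ [1] ++ List.replicate k 0) ++ [(0:Int)] by simp,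
      hdrop, List.drop_left, List.dropLast_concat]
  simp [pvRowI, List.replicate_succ]
  omega

-- the fold's invariant: consuming l with unit row i appends the remaining augmented rows
theorem pv_B_inv (N : Nat) :
    ∀ (l : List (List Int)) (i : Nat) (acc : List (List Int)),
      i + l.length = N →
      (l.foldl (fun (st : List (List Int) × List Int) row =>
          (st.1 ++ [row ++ st.2],
           PySem.List.slice st.2 (some (-1)) none ++ PySem.List.slice st.2 none (some (-1))))
        (acc, pvRowI N i)).1
      = acc ++ (List.range l.length).map (fun j => l.getD j [] ++ pvRowI N (i + j)) := by
  intro l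
  induction l with
  | nil => intro i acc _; simp
  | cons r rs ih =>
    intro i acc hN
    simp only [List.foldl_cons]
    cases rs with
    | nil => simp [List.range_succ]
    | cons x xs =>
      rw [pv_rotate_row N i (by simp at hN; omega)]
      rw [ih (i + 1) (acc ++ [r ++ pvRowI N i]) (by simp at hN ⊢; omega)]
      conv_rhs => rw [show (r :: x :: xs).length = (x :: xs).length + 1 from rfl,
        List.range_succ_eq_map, List.map_cons, List.map_map]
      simp only [List.getD_cons_zero, Nat.add_zero, List.append_assoc, List.singleton_append]
      congr 1
      congr 1
      apply List.map_congr_left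
      intro j _
      simp only [Function.comp, List.getD_cons_succ]
      congr 2
      omega

-- ===== VERDICT (by name: the statement is the Claim_ definition above) =====
theorem adjoin_identity_spec : Claim_equal_adjoin_identity := by
  intro matrix _
  unfold Spec_adjoin_identity adjoin_identity_alt
  cases matrix with
  | nil => simp [adjoin_identity]
  | cons r rs =>
    rw [pv_A_closed]
    have h0 : (1 : Int) :: List.replicate ((r :: rs).length - 1) 0 = pvRowI (r :: rs).length 0 := by
      simp [pvRowI]
    simp only [ne_eq, reduceCtorEq, not_false_eq_true, if_pos, h0]
    rw [pv_B_inv (r :: rs).length (r :: rs) 0 [] (by simp)]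
    simp
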